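-- pv_equiv track=rewrite | github.com/LLNL/hdbind | hdpy/RelHD/cora_lp_hd.py | gathering
-- ===== SOURCE A (Python) =====
-- from collections import defaultdict, OrderedDict
--
-- def gathering(input, node_num):
--     result = defaultdict(list)
--     for i in input:
--         result[i[1]].append(i[0])
--     flattened_gathering = []
--     flattened_gathering_indptr = [0]
--     curr_size = 0
--     for node_idx in range(node_num):
--         v = result[node_idx]
--         if len(v) == 0:
--             flattened_gathering_indptr.append(curr_size)
--         else:
--             flattened_gathering.extend(v)
--             curr_size += len(v)
--             flattened_gathering_indptr.append(curr_size)
--     return flattened_gathering, flattened_gathering_indptr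
-- ===== SOURCE B (Python) =====
-- def gathering(input, node_num):
--     # Different decomposition: no dict grouping -- for each node in order, scan the
--     # edge list and append the sources whose target equals that node; indptr is
--     # just the running length of the flattened list.
--     flattened = []
--     indptr = [0]
--     for n in range(node_num):
--         for e in input:
--             if e[1] == n:
--                 flattened.append(e[0])
--         indptr.append(len(flattened))
--     return flattened, indptr
-- ===== Notes on version B (the rewrite author's own statement) =====
-- stated objective: alternative
-- what changed: B drops the defaultdict grouping pass entirely: for each node index it scans the edge list directly, appending matching sources, and reads indptr off the running length of the flattened list.
import Mathlib
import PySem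

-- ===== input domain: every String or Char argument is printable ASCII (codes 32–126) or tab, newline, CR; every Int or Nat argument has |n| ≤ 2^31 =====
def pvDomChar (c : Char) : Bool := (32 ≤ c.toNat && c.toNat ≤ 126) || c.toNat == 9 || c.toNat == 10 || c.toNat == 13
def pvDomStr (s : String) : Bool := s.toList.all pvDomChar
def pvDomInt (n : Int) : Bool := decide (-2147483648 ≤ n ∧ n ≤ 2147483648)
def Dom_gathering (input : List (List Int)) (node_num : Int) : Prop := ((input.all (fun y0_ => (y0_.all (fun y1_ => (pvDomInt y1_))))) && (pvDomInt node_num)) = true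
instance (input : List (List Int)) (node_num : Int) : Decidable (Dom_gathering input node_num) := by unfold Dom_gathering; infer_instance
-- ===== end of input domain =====

-- B replaces A's defaultdict grouping pass by a per-node scan of the edge list (alternative decomposition, same return value).

-- ===== PORT A =====
-- i[1] / i[0] are ported as pyGetD _ _ 0: exact under Pre_ (rows have length ≥ 2, so the index is in range).
def gathering (input : List (List Int)) (node_num : Int) : List Int × List Int :=
  let result : PySem.Dict Int (List Int) :=
    input.foldl (fun d i =>
      d.modify (PySem.List.pyGetD i 1 0) [] (fun v => v ++ [PySem.List.pyGetD i 0 0]))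
      PySem.Dict.empty
  let st := (PySem.List.pyRange 0 node_num 1).foldl
    (fun (st : List Int × List Int × Int) node_idx =>
      let v := result.getD node_idx []
      if v.length = 0 then (st.1, st.2.1 ++ [st.2.2], st.2.2)
      else (st.1 ++ v, st.2.1 ++ [st.2.2 + (v.length : Int)], st.2.2 + (v.length : Int)))
    ([], [0], 0)
  (st.1, st.2.1)

-- ===== PORT B =====
def gathering_alt (input : List (List Int)) (node_num : Int) : List Int × List Int :=
  (PySem.List.pyRange 0 node_num 1).foldl
    (fun (st : List Int × List Int) n =>
      let fl := input.foldl
        (fun fl e => if PySem.List.pyGetD e 1 0 == n then fl ++ [PySem.List.pyGetD e 0 0] else fl)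
        st.1
      (fl, st.2 ++ [(fl.length : Int)]))
    ([], [0])

-- ===== PRECONDITION & SPEC =====
-- Pre_ excludes exactly the inputs with a row of fewer than 2 elements, on which the Python A raises IndexError (i[1]).
def Pre_gathering (input : List (List Int)) (node_num : Int) : Prop :=
  ∀ e ∈ input, 2 ≤ e.length
instance (input : List (List Int)) (node_num : Int) : Decidable (Pre_gathering input node_num) := by unfold Pre_gathering; infer_instance
def pvWitness_gathering : List (List Int) × Int := ([[1, 0], [2, 0], [3, 1]], 3)

def Spec_gathering (input : List (List Int)) (node_num : Int) (out : List Int × List Int) : Prop := out = gathering_alt input node_num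
instance (input : List (List Int)) (node_num : Int) (out : List Int × List Int) : Decidable (Spec_gathering input node_num out) := by unfold Spec_gathering; infer_instance

-- ===== CLAIM (what is proved, stated in full; the proofs are below) =====
def Claim_equal_gathering : Prop := ∀ (input : List (List Int)) (node_num : Int), Dom_gathering input node_num → Pre_gathering input node_num → Spec_gathering input node_num (gathering input node_num)

-- ===== LEMMAS AND PROOFS =====

-- The sources B collects for node k: one filtered scan of the edge list.
def pvGroup (input : List (List Int)) (k : Int) : List Int :=
  (input.filter (fun e => PySem.List.pyGetD e 1 0 == k)).map (fun e => PySem.List.pyGetD e 0 0)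

-- A's dict of grouped sources reads back, at any key, exactly B's filtered scan.
theorem getD_groupDict (input : List (List Int)) (d : PySem.Dict Int (List Int)) (k : Int) :
    (input.foldl (fun d i =>
      d.modify (PySem.List.pyGetD i 1 0) [] (fun v => v ++ [PySem.List.pyGetD i 0 0])) d).getD k []
    = d.getD k [] ++ pvGroup input k := by
  induction input generalizing d with
  | nil => simp [pvGroup]
  | cons i input ih =>
    simp only [List.foldl_cons, ih, pvGroup, List.filter_cons]
    by_cases h : PySem.List.pyGetD i 1 0 = k
    · simp [h]
    · simp [PySem.Dict.getD_modify, h, Ne.symm h, beq_iff_eq]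

theorem getD_groupDict_empty (input : List (List Int)) (k : Int) :
    (input.foldl (fun d i =>
      d.modify (PySem.List.pyGetD i 1 0) [] (fun v => v ++ [PySem.List.pyGetD i 0 0]))
      PySem.Dict.empty).getD k []
    = pvGroup input k := by
  rw [getD_groupDict]; simp

-- One node step of A (with running size = length of the flattened list) equals one node step of B.
theorem step_eq (input : List (List Int)) (n : Int) (fg ip : List Int) :
    (fun (st : List Int × List Int × Int) node_idx =>
      let v := (input.foldl (fun d i =>
        d.modify (PySem.List.pyGetD i 1 0) [] (fun v => v ++ [PySem.List.pyGetD i 0 0]))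
        PySem.Dict.empty).getD node_idx []
      if v.length = 0 then (st.1, st.2.1 ++ [st.2.2], st.2.2)
      else (st.1 ++ v, st.2.1 ++ [st.2.2 + (v.length : Int)], st.2.2 + (v.length : Int)))
      (fg, ip, (fg.length : Int)) n
    = (((fun (st : List Int × List Int) n =>
        let fl := input.foldl
          (fun fl e => if PySem.List.pyGetD e 1 0 == n then fl ++ [PySem.List.pyGetD e 0 0] else fl)
          st.1
        (fl, st.2 ++ [(fl.length : Int)])) (fg, ip) n).1,
       ((fun (st : List Int × List Int) n =>
        let fl := input.foldl
          (fun fl e => if PySem.List.pyGetD e 1 0 == n then fl ++ [PySem.List.pyGetD e 0 0] else fl)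
          st.1
        (fl, st.2 ++ [(fl.length : Int)])) (fg, ip) n).2,
       ((((fun (st : List Int × List Int) n =>
        let fl := input.foldl
          (fun fl e => if PySem.List.pyGetD e 1 0 == n then fl ++ [PySem.List.pyGetD e 0 0] else fl)
          st.1
        (fl, st.2 ++ [(fl.length : Int)])) (fg, ip) n).1.length : Int))) := by
  simp only [getD_groupDict_empty, PySem.List.foldl_append_if]
  by_cases h : pvGroup input n = []
  · simp only [pvGroup] at h ⊢
    simp [h]
  · have hlen : (pvGroup input n).length ≠ 0 := by simpa using h
    simp only [pvGroup] at hlen ⊢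
    simp only [if_neg hlen, List.length_append]
    push_cast
    rfl

-- The whole per-node loops agree, for any node list and any common accumulated state.
theorem fold_agree (input : List (List Int)) (L : List Int) (fg ip : List Int) :
    L.foldl
      (fun (st : List Int × List Int × Int) node_idx =>
        let v := (input.foldl (fun d i =>
          d.modify (PySem.List.pyGetD i 1 0) [] (fun v => v ++ [PySem.List.pyGetD i 0 0]))
          PySem.Dict.empty).getD node_idx []
        if v.length = 0 then (st.1, st.2.1 ++ [st.2.2], st.2.2)
        else (st.1 ++ v, st.2.1 ++ [st.2.2 + (v.length : Int)], st.2.2 + (v.length : Int)))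
      (fg, ip, (fg.length : Int))
    = (let b := L.foldl
        (fun (st : List Int × List Int) n =>
          let fl := input.foldl
            (fun fl e => if PySem.List.pyGetD e 1 0 == n then fl ++ [PySem.List.pyGetD e 0 0] else fl)
            st.1
          (fl, st.2 ++ [(fl.length : Int)]))
        (fg, ip)
       (b.1, b.2, (b.1.length : Int))) := by
  induction L generalizing fg ip with
  | nil => rfl
  | cons n L ih =>
    rw [List.foldl_cons, List.foldl_cons]
    have hs := step_eq input n fg ip
    dsimp only at hs ⊢
    rw [hs]
    exact ih _ _

-- ===== VERDICT (by name: the statement is the Claim_ definition above) =====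
theorem gathering_spec : Claim_equal_gathering := by
  intro input node_num _ _
  show gathering input node_num = gathering_alt input node_num
  simp only [gathering, gathering_alt]
  have h := fold_agree input (PySem.List.pyRange 0 node_num 1) [] [0]
  simp only [List.length_nil, Nat.cast_zero] at h
  rw [h]
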